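-- pv_equiv track=rewrite | github.com/dorianmatic/simple-c-compiler | lab1/utils/regex.py | split_by_or
-- ===== SOURCE A (Python) =====
-- def escaped(regex, position):
--     """Checks if the symbol in a given position in the regex is escaped by '\' or not."""
--
--     backslash_n = 0
--     for i in range(position-1, -1, -1):
--         if regex[i] != '\\':
--             break
--
--         backslash_n += 1
--
--     return backslash_n % 2 == 1
--
-- def split_by_or(regex):
--     """Splits the regex by top-level pipes - '|'."""
--
--     parentheses = 0
--     or_choices = []
--     prev_choice = 0
--
--     for i, c in enumerate(regex):
--         if escaped(regex, i):
--             continue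
--
--         if c == '(':
--             parentheses += 1
--         elif c == ')':
--             parentheses -= 1
--         elif c == '|' and parentheses == 0:
--             or_choices.append(regex[prev_choice:i])
--             prev_choice = i + 1
--
--     if len(or_choices) != 0 and regex[prev_choice:]:
--         or_choices.append(regex[prev_choice:])
--
--     return or_choices
-- ===== SOURCE B (Python) =====
-- def split_by_or(regex):
--     """Splits the regex by top-level pipes - '|' (single pass, incremental
--     backslash-run parity instead of rescanning, chunk accumulator instead of slicing)."""
--     parts = []
--     cur = []
--     depth = 0
--     run = 0
--     for c in regex:
--         esc = run % 2 == 1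
--         run = run + 1 if c == '\\' else 0
--         if esc:
--             cur.append(c)
--         elif c == '(':
--             depth += 1
--             cur.append(c)
--         elif c == ')':
--             depth -= 1
--             cur.append(c)
--         elif c == '|' and depth == 0:
--             parts.append(''.join(cur))
--             cur = []
--         else:
--             cur.append(c)
--     if parts and cur:
--         parts.append(''.join(cur))
--     return parts
-- ===== Notes on version B (the rewrite author's own statement) =====
-- stated objective: faster
-- what changed: B tracks the parity of the current run of consecutive backslashes incrementally and accumulates the current chunk character by character, replacing A's backward rescan (escaped) at every position and its index-based slicing with a single forward pass.
import Mathlib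
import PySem

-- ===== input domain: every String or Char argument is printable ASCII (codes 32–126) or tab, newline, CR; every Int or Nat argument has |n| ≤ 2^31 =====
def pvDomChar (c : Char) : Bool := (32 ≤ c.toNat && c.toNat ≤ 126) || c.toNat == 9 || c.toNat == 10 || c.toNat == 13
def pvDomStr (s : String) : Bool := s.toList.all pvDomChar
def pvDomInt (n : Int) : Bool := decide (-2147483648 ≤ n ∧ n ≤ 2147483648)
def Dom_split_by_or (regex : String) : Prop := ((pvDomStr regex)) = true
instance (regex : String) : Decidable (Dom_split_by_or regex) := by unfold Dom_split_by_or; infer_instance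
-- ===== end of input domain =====

-- B replaces A's quadratic backward rescan for escapedness by an incrementally
-- maintained backslash-run parity and an explicit chunk accumulator (single O(n) pass).

-- ===== PORT A =====
-- A's helper `escaped`: walk backwards from position-1 counting consecutive backslashes.
def countBackA (s : List Char) : Nat → Int
  | 0 => 0
  | p + 1 => if s.getD p ' ' = '\\' then countBackA s p + 1 else 0

def escapedA (s : List Char) (i : Nat) : Bool := countBackA s i % 2 == 1

-- one iteration of A's main loop; state = (parentheses, or_choices, prev_choice)
def stepA (s : List Char) (st : Int × List String × Nat) (i : Nat) : Int × List String × Nat :=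
  if escapedA s i then st
  else
    let c := s.getD i ' '
    if c = '(' then (st.1 + 1, st.2.1, st.2.2)
    else if c = ')' then (st.1 - 1, st.2.1, st.2.2)
    else if c = '|' ∧ st.1 = 0 then
      (st.1, st.2.1 ++ [String.mk ((s.take i).drop st.2.2)], i + 1)
    else st

def split_by_or (regex : String) : List String :=
  let s := regex.toList
  let r := (List.range s.length).foldl (stepA s) (0, [], 0)
  if r.2.1 ≠ [] ∧ s.drop r.2.2 ≠ [] then r.2.1 ++ [String.mk (s.drop r.2.2)] else r.2.1

-- ===== PORT B =====
-- one iteration of B's loop; state = (depth, run, cur, parts)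
def stepB (st : Int × Int × List Char × List String) (c : Char) : Int × Int × List Char × List String :=
  let run' : Int := if c = '\\' then st.2.1 + 1 else 0
  if st.2.1 % 2 == 1 then (st.1, run', st.2.2.1 ++ [c], st.2.2.2)
  else if c = '(' then (st.1 + 1, run', st.2.2.1 ++ [c], st.2.2.2)
  else if c = ')' then (st.1 - 1, run', st.2.2.1 ++ [c], st.2.2.2)
  else if c = '|' ∧ st.1 = 0 then (st.1, run', [], st.2.2.2 ++ [String.mk st.2.2.1])
  else (st.1, run', st.2.2.1 ++ [c], st.2.2.2)

def split_by_or_alt (regex : String) : List String :=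
  let r := regex.toList.foldl stepB (0, 0, [], [])
  if r.2.2.2 ≠ [] ∧ r.2.2.1 ≠ [] then r.2.2.2 ++ [String.mk r.2.2.1] else r.2.2.2

-- ===== PRECONDITION & SPEC =====
def Spec_split_by_or (regex : String) (out : List String) : Prop := out = split_by_or_alt regex
instance (regex : String) (out : List String) : Decidable (Spec_split_by_or regex out) := by unfold Spec_split_by_or; infer_instance

-- ===== CLAIM (what is proved, stated in full; the proofs are below) =====
def Claim_equal_split_by_or : Prop := ∀ (regex : String), Dom_split_by_or regex → Spec_split_by_or regex (split_by_or regex)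

-- ===== LEMMAS AND PROOFS =====

-- Loop invariant: B's fold over the suffix s.drop k, started with run = number of
-- trailing backslashes of s.take k and cur = the pending chunk (s.take k).drop prev,
-- computes exactly the components of A's fold over the index range [k, s.length).
lemma loop_eq (s : List Char) : ∀ (m k : Nat) (par : Int) (prev : Nat) (acc : List String),
    k + m = s.length → prev ≤ k →
    (s.drop k).foldl stepB (par, countBackA s k, (s.take k).drop prev, acc)
    = (((List.range' k m).foldl (stepA s) (par, acc, prev)).1,
       countBackA s s.length,
       s.drop ((List.range' k m).foldl (stepA s) (par, acc, prev)).2.2,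
       ((List.range' k m).foldl (stepA s) (par, acc, prev)).2.1) := by
  intro m
  induction m with
  | zero =>
    intro k par prev acc hk hp
    simp at hk
    subst hk
    simp [List.range']
  | succ m ih =>
    intro k par prev acc hk hp
    have hklt : k < s.length := by omega
    have hdrop : s.drop k = s[k] :: s.drop (k + 1) := List.drop_eq_getElem_cons hklt
    have hget : s[k]?.getD ' ' = s[k] := by
      simp [List.getElem?_eq_getElem hklt]
    have htake : s.take (k + 1) = s.take k ++ [s[k]] := by
      rw [List.take_add_one, List.getElem?_eq_getElem hklt]
      rfl
    have hcur : (s.take k).drop prev ++ [s[k]] = (s.take (k + 1)).drop prev := by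
      rw [htake, List.drop_append_of_le_length (by simp; omega)]
    have hrun : (if s[k] = '\\' then countBackA s k + 1 else (0 : Int))
        = countBackA s (k + 1) := by
      simp [countBackA, List.getD, List.getElem?_eq_getElem hklt]
    rw [hdrop]
    rw [List.range'_succ]
    simp only [List.foldl_cons]
    by_cases hesc : escapedA s k
    · have hB : stepB (par, countBackA s k, (s.take k).drop prev, acc)
          s[k] = (par, countBackA s (k + 1), (s.take (k + 1)).drop prev, acc) := by
        have hb : (countBackA s k % 2 == 1) = true := by
          simpa [escapedA] using hesc
        simp [stepB, hb, hcur, hrun]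
      have hA : stepA s (par, acc, prev) k = (par, acc, prev) := by
        simp [stepA, hesc]
      rw [hB, hA]
      exact ih (k + 1) par prev acc (by omega) (by omega)
    · have hescb : (countBackA s k % 2 == 1) = false := by
        simpa [escapedA] using hesc
      by_cases h1 : s[k] = '('
      · have hrun0 : countBackA s (k + 1) = 0 := by
          rw [← hrun]; simp [h1]
        have hB : stepB (par, countBackA s k, (s.take k).drop prev, acc) s[k]
            = (par + 1, countBackA s (k + 1), (s.take (k + 1)).drop prev, acc) := by
          simp [stepB, hescb, h1, hrun0]
          simpa [h1] using hcur
        have hA : stepA s (par, acc, prev) k = (par + 1, acc, prev) := by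
          simp [stepA, hesc, hget, h1]
        rw [hB, hA]
        exact ih (k + 1) (par + 1) prev acc (by omega) (by omega)
      · by_cases h2 : s[k] = ')'
        · have hrun0 : countBackA s (k + 1) = 0 := by
            rw [← hrun]; simp [h2]
          have hB : stepB (par, countBackA s k, (s.take k).drop prev, acc) s[k]
              = (par - 1, countBackA s (k + 1), (s.take (k + 1)).drop prev, acc) := by
            simp [stepB, hescb, h1, h2, hrun0]
            simpa [h2] using hcur
          have hA : stepA s (par, acc, prev) k = (par - 1, acc, prev) := by
            simp [stepA, hesc, hget, h1, h2]
          rw [hB, hA]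
          exact ih (k + 1) (par - 1) prev acc (by omega) (by omega)
        · by_cases h3 : s[k] = '|' ∧ par = 0
          · have hrun0 : countBackA s (k + 1) = 0 := by
              rw [← hrun]; simp [h3.1]
            have hB : stepB (par, countBackA s k, (s.take k).drop prev, acc) s[k]
                = (par, countBackA s (k + 1), [], acc ++ [String.mk ((s.take k).drop prev)]) := by
              simp [stepB, hescb, h1, h2, h3.1, h3.2, hrun0]
            have hA : stepA s (par, acc, prev) k
                = (par, acc ++ [String.mk ((s.take k).drop prev)], k + 1) := by
              simp [stepA, hesc, hget, h1, h2, h3.1, h3.2]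
            rw [hB, hA]
            have hnil : (s.take (k + 1)).drop (k + 1) = [] := by
              apply List.drop_eq_nil_of_le
              simp
            rw [← hnil]
            exact ih (k + 1) par (k + 1) (acc ++ [String.mk ((s.take k).drop prev)]) (by omega) (by omega)
          · have hB : stepB (par, countBackA s k, (s.take k).drop prev, acc) s[k]
                = (par, countBackA s (k + 1), (s.take (k + 1)).drop prev, acc) := by
              simp [stepB, hescb, h1, h2, h3, hcur, hrun]
            have hA : stepA s (par, acc, prev) k = (par, acc, prev) := by
              simp [stepA, hesc, hget, h1, h2, h3]
            rw [hB, hA]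
            exact ih (k + 1) par prev acc (by omega) (by omega)

-- ===== VERDICT (by name: the statement is the Claim_ definition above) =====
theorem split_by_or_spec : Claim_equal_split_by_or := by
  intro regex _
  have h := loop_eq regex.toList regex.toList.length 0 0 0 [] (by omega) (by omega)
  simp only [List.drop_zero, List.take_zero, List.drop_nil] at h
  rw [← List.range_eq_range'] at h
  have h' : regex.toList.foldl stepB ((0 : Int), (0 : Int), ([] : List Char), ([] : List String))
      = (((List.range regex.toList.length).foldl (stepA regex.toList) (0, [], 0)).1,
         countBackA regex.toList regex.toList.length,
         regex.toList.drop ((List.range regex.toList.length).foldl (stepA regex.toList) (0, [], 0)).2.2,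
         ((List.range regex.toList.length).foldl (stepA regex.toList) (0, [], 0)).2.1) := h
  show split_by_or regex = split_by_or_alt regex
  simp only [split_by_or, split_by_or_alt]
  rw [h']
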